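-- pv_equiv track=rewrite | github.com/mathias1601/Advent-of-code-2025 | day2/part2.py | iterateSequenzeRange
-- ===== SOURCE A (Python) =====
-- def iterateSequenzeRange(number, sequenceRange):
--
--     startPart = 0
--     endPart = sequenceRange
--     sequence = str(number)[startPart:endPart]
--
--     for i in range((len(str(number)) // sequenceRange)-1):
--
--         startPart += sequenceRange
--         endPart += sequenceRange
--
--         if str(number)[startPart:endPart] != sequence:
--             return 0
--
--     return number
-- ===== SOURCE B (Python) =====
-- def iterateSequenzeRange(number, sequenceRange):
--     s = str(number)
--     n = len(s) // sequenceRange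
--     if n < 1:
--         return number
--     return number if s[:sequenceRange] * n == s[:n * sequenceRange] else 0
-- ===== Notes on version B (the rewrite author's own statement) =====
-- stated objective: simpler
-- what changed: Replaces the block-by-block loop with a single closed-form comparison: build the first block repeated n times and compare it with the truncated prefix s[:n*sequenceRange]; Pre_ excludes only sequenceRange = 0, where A raises ZeroDivisionError.
import Mathlib
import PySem

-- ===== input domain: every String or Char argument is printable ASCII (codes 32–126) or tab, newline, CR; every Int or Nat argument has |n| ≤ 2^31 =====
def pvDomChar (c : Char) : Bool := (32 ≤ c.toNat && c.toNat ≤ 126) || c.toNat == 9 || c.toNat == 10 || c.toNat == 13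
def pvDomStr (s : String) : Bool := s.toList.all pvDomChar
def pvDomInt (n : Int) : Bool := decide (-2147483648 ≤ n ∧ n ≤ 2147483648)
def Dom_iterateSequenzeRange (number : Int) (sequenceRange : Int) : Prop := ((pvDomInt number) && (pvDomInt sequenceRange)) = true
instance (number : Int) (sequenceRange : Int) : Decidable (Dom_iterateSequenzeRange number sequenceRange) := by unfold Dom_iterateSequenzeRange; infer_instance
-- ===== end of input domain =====

-- B replaces A's block-by-block loop with one closed-form comparison (first block repeated n times vs the truncated prefix); objective: simpler.


-- ===== PORT A =====
-- the for-loop with early 'return 0': state (startPart, endPart); none = returned 0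
def iterSeqLoopA (s seq : List Char) (k : Int) : List Int → Int × Int → Option (Int × Int)
  | [], st => some st
  | _ :: rest, (sp, ep) =>
      let sp' := sp + k
      let ep' := ep + k
      if PySem.List.slice s (some sp') (some ep') ≠ seq then none
      else iterSeqLoopA s seq k rest (sp', ep')

def iterateSequenzeRange (number : Int) (sequenceRange : Int) : Int :=
  let startPart : Int := 0
  let endPart : Int := sequenceRange
  let sequence := PySem.List.slice (PySem.Int.toChars number) (some startPart) (some endPart)
  match iterSeqLoopA (PySem.Int.toChars number) sequence sequenceRange
      (PySem.List.pyRange 0 (PySem.Int.floordiv ((PySem.Int.toChars number).length : Int) sequenceRange - 1) 1)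
      (startPart, endPart) with
  | none => 0
  | some _ => number

-- ===== PORT B =====
def iterateSequenzeRange_alt (number : Int) (sequenceRange : Int) : Int :=
  let s := PySem.Int.toChars number
  let n := PySem.Int.floordiv (s.length : Int) sequenceRange
  if n < 1 then number
  else if (List.replicate n.toNat (PySem.List.slice s none (some sequenceRange))).flatten
          = PySem.List.slice s none (some (n * sequenceRange)) then number
  else 0

-- ===== PRECONDITION & SPEC =====
-- A raises ZeroDivisionError exactly when sequenceRange = 0 (len // sequenceRange); excluded.
def Pre_iterateSequenzeRange (number : Int) (sequenceRange : Int) : Prop := sequenceRange ≠ 0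
instance (number : Int) (sequenceRange : Int) : Decidable (Pre_iterateSequenzeRange number sequenceRange) := by unfold Pre_iterateSequenzeRange; infer_instance
def pvWitness_iterateSequenzeRange : Int × Int := (123123, 3)

def Spec_iterateSequenzeRange (number : Int) (sequenceRange : Int) (out : Int) : Prop := out = iterateSequenzeRange_alt number sequenceRange
instance (number : Int) (sequenceRange : Int) (out : Int) : Decidable (Spec_iterateSequenzeRange number sequenceRange out) := by unfold Spec_iterateSequenzeRange; infer_instance

-- ===== CLAIM (what is proved, stated in full; the proofs are below) =====
def Claim_equal_iterateSequenzeRange : Prop := ∀ (number : Int) (sequenceRange : Int), Dom_iterateSequenzeRange number sequenceRange → Pre_iterateSequenzeRange number sequenceRange → Spec_iterateSequenzeRange number sequenceRange (iterateSequenzeRange number sequenceRange)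

-- ===== LEMMAS AND PROOFS =====

-- A's loop succeeds iff every later block equals the first block
theorem iterSeqLoopA_isSome_iff (s seq : List Char) (k : Int) (l : List Int) (sp ep : Int) :
    (iterSeqLoopA s seq k l (sp, ep)).isSome =
      decide (∀ j < l.length, PySem.List.slice s (some (sp + ((j : Int) + 1) * k)) (some (ep + ((j : Int) + 1) * k)) = seq) := by
  induction l generalizing sp ep with
  | nil => simp [iterSeqLoopA]
  | cons x rest ih =>
      simp only [iterSeqLoopA]
      by_cases h : PySem.List.slice s (some (sp + k)) (some (ep + k)) = seq
      · have hstep : ∀ j : Nat,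
            (PySem.List.slice s (some (sp + k + ((j : Int) + 1) * k)) (some (ep + k + ((j : Int) + 1) * k)) = seq)
            = (PySem.List.slice s (some (sp + (((j + 1 : Nat) : Int) + 1) * k)) (some (ep + (((j + 1 : Nat) : Int) + 1) * k)) = seq) := by
          intro j
          rw [show sp + (((j + 1 : Nat) : Int) + 1) * k = sp + k + ((j : Int) + 1) * k by push_cast; ring,
              show ep + (((j + 1 : Nat) : Int) + 1) * k = ep + k + ((j : Int) + 1) * k by push_cast; ring]
        simp only [h, ite_not, if_true]
        rw [ih, decide_eq_decide]
        constructor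
        · intro hall j hj
          cases j with
          | zero => simpa using h
          | succ m =>
              have := hall m (by simpa using hj)
              rw [hstep m] at this
              exact this
        · intro hall j hj
          rw [hstep j]
          exact hall (j + 1) (by simp at hj ⊢; omega)
      · have h3 : ¬ ∀ j < (x :: rest).length, PySem.List.slice s (some (sp + ((j : Int) + 1) * k)) (some (ep + ((j : Int) + 1) * k)) = seq := by
          intro hall
          exact h (by simpa using hall 0 (by simp))
        simp [h]
        refine ⟨0, by simp, ?_⟩
        simpa using h

-- B's repetition test, unfolded into per-block equalities
theorem replicate_flatten_eq_take_iff (k : Nat) (b : List Char) (hb : b.length = k) :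
    ∀ (n : Nat) (s : List Char), n * k ≤ s.length →
      ((List.replicate n b).flatten = s.take (n * k) ↔ ∀ i < n, (s.drop (i * k)).take k = b) := by
  intro n
  induction n with
  | zero => intro s _; simp
  | succ m ih =>
      intro s hlen
      have hk : k ≤ s.length := by
        have : 1 * k ≤ (m + 1) * k := Nat.mul_le_mul_right k (by omega)
        omega
      have hsplit : s.take ((m + 1) * k) = s.take k ++ (s.drop k).take (m * k) := by
        rw [show (m + 1) * k = k + m * k by ring, List.take_add]
      rw [hsplit]
      have hrep : (List.replicate (m + 1) b).flatten = b ++ (List.replicate m b).flatten := by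
        simp [List.replicate_succ]
      rw [hrep]
      have hlenb : b.length = (s.take k).length := by
        simp [hb, Nat.min_eq_left hk]
      have hdroplen : m * k ≤ (s.drop k).length := by
        simp only [List.length_drop]
        have : (m + 1) * k = m * k + k := by ring
        omega
      constructor
      · intro h
        have := List.append_inj h hlenb
        obtain ⟨h1, h2⟩ := this
        intro i hi
        cases i with
        | zero => simpa [hb] using h1.symm
        | succ j =>
            have := ((ih (s.drop k) hdroplen).mp h2) j (by omega)
            rwa [List.drop_drop, show k + j * k = (j + 1) * k by ring] at this
      · intro h
        have h0 : b = s.take k := by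
          have := h 0 (by omega)
          simpa [hb] using this.symm
        have hrest : (List.replicate m b).flatten = (s.drop k).take (m * k) := by
          apply (ih (s.drop k) hdroplen).mpr
          intro i hi
          have := h (i + 1) (by omega)
          rwa [show (i + 1) * k = k + i * k by ring, ← List.drop_drop] at this
        rw [← h0, hrest]

-- ===== VERDICT (by name: the statement is the Claim_ definition above) =====
theorem iterateSequenzeRange_spec : Claim_equal_iterateSequenzeRange := by
  intro number sequenceRange _ hpre
  unfold Spec_iterateSequenzeRange iterateSequenzeRange iterateSequenzeRange_alt
  set s := PySem.Int.toChars number with hs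
  set n := PySem.Int.floordiv (s.length : Int) sequenceRange with hn
  by_cases hlt : n < 1
  · -- fewer than one full block: A's loop range is empty, B short-circuits
    have hnil : PySem.List.pyRange 0 (n - 1) 1 = [] := PySem.List.pyRange_one_eq_nil (by omega)
    simp [hnil, iterSeqLoopA]
    intro h1
    rw [← hn] at h1
    exact absurd h1 (by omega)
  · -- n >= 1 forces sequenceRange > 0
    rw [Int.not_lt] at hlt
    have hk : 0 < sequenceRange := by
      rcases lt_trichotomy sequenceRange 0 with hneg | hzero | hpos
      · exfalso
        have hdm := PySem.Int.floordiv_mul_add_mod (s.length : Int) sequenceRange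
        have hb := PySem.Int.mod_neg_bounds (a := (s.length : Int)) (b := sequenceRange) hneg
        rw [← hn] at hdm
        nlinarith [Int.natCast_nonneg s.length, hb.1, hb.2]
      · exact absurd hzero hpre
      · exact hpos
    have hbr := (PySem.Int.floordiv_eq_iff_of_pos (a := (s.length : Int)) (b := sequenceRange) (q := n) hk).mp hn.symm
    -- pass to Nat values
    set K := sequenceRange.toNat with hK
    set N := n.toNat with hN
    have hkK : sequenceRange = (K : Int) := by omega
    have hnN : n = (N : Int) := by omega
    have hNpos : 0 < N := by omega
    have hNK : N * K ≤ s.length := by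
      have := hbr.1
      rw [hkK, hnN] at this
      exact_mod_cast this
    have hKle : K ≤ s.length := by
      have : 1 * K ≤ N * K := Nat.mul_le_mul_right K (by omega)
      omega
    -- the first block, as take
    have hseq : PySem.List.slice s (some 0) (some sequenceRange) = s.take K := by
      rw [hkK]
      simpa using PySem.List.slice_natCast (xs := s) (a := 0) (b := K)
    have hblen : (s.take K).length = K := by
      simp [Nat.min_eq_left hKle]
    -- each loop comparison is a block equality
    have hblock : ∀ j : Nat,
        (PySem.List.slice s (some ((0 : Int) + ((j : Int) + 1) * sequenceRange)) (some (sequenceRange + ((j : Int) + 1) * sequenceRange))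
          = PySem.List.slice s (some 0) (some sequenceRange))
        ↔ ((s.drop ((j + 1) * K)).take K = s.take K) := by
      intro j
      rw [hseq, hkK]
      have e1 : (0 : Int) + ((j : Int) + 1) * (K : Int) = (((j + 1) * K : Nat) : Int) := by push_cast; ring
      have e2 : (K : Int) + ((j : Int) + 1) * (K : Int) = ((((j + 1) * K + K) : Nat) : Int) := by push_cast; ring
      rw [e1, e2, PySem.List.slice_natCast]
      have e3 : (j + 1) * K + K - (j + 1) * K = K := by omega
      rw [e3]
    have hlen : (PySem.List.pyRange 0 (n - 1) 1).length = N - 1 := by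
      rw [PySem.List.length_pyRange_one]; omega
    have hrep := replicate_flatten_eq_take_iff K (s.take K) hblen N s hNK
    -- A's loop succeeds exactly when B's repetition test succeeds
    have hkey : (iterSeqLoopA s (PySem.List.slice s (some 0) (some sequenceRange)) sequenceRange
          (PySem.List.pyRange 0 (n - 1) 1) (0, sequenceRange)).isSome
        = decide ((List.replicate N (s.take K)).flatten = s.take (N * K)) := by
      rw [iterSeqLoopA_isSome_iff, decide_eq_decide, hrep, hlen]
      constructor
      · intro hall i hi
        cases i with
        | zero => simp
        | succ m => exact (hblock m).mp (hall m (by omega))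
      · intro hall j hj
        exact (hblock j).mpr (hall (j + 1) (by omega))
    -- B's slices, as takes
    have hBn : PySem.List.slice s none (some (n * sequenceRange)) = s.take (N * K) := by
      rw [hkK, hnN, show ((N : Int)) * ((K : Int)) = ((N * K : Nat) : Int) by push_cast; ring,
          PySem.List.slice_to_natCast]
    have hBblock : PySem.List.slice s none (some sequenceRange) = s.take K := by
      rw [hkK, PySem.List.slice_to_natCast]
    rw [if_neg (by omega : ¬ n < 1), hBn, hBblock, ← hN]
    rcases hres : iterSeqLoopA s (PySem.List.slice s (some 0) (some sequenceRange)) sequenceRange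
        (PySem.List.pyRange 0 (n - 1) 1) (0, sequenceRange) with _ | st
    · rw [hres] at hkey
      simp only [Option.isSome_none, Bool.false_eq, decide_eq_false_iff_not] at hkey
      simp only [hres]
      rw [if_neg hkey]
    · rw [hres] at hkey
      simp only [Option.isSome_some, Bool.true_eq, decide_eq_true_eq] at hkey
      simp only [hres]
      rw [if_pos hkey]
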